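-- pv_equiv track=rewrite | github.com/Zipstack/visitran | backend/backend/application/visitran_backend_context.py | _collect_downstream
-- ===== SOURCE A (Python) =====
-- from typing import Dict, Any, List, Set, Union
--
-- def _collect_downstream(model_name: str, children_of: Dict[str, Set[str]]) -> Set[str]:
--     """Collect all downstream dependents (children) of a model via BFS."""
--     result = set()
--     stack = [model_name]
--     while stack:
--         current = stack.pop()
--         for child in children_of.get(current, set()):
--             if child not in result:
--                 result.add(child)
--                 stack.append(child)
--     return result
-- ===== SOURCE B (Python) =====
-- from typing import Dict, Set
--
-- def _collect_downstream(model_name: str, children_of: Dict[str, Set[str]]) -> Set[str]: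
--     """Collect all downstream dependents via level-synchronous frontier BFS (set algebra)."""
--     result = set()
--     frontier = {model_name}
--     while frontier:
--         nxt = set()
--         for node in frontier:
--             nxt |= children_of.get(node, set())
--         frontier = nxt - result
--         result |= frontier
--     return result
-- ===== Notes on version B (the rewrite author's own statement) =====
-- stated objective: alternative
-- what changed: Replaced the per-node explicit-stack loop with per-child membership tests by a level-synchronous frontier BFS that expands a whole frontier at once with set union/difference; the reachable set is the same regardless of traversal order.
import Mathlib
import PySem

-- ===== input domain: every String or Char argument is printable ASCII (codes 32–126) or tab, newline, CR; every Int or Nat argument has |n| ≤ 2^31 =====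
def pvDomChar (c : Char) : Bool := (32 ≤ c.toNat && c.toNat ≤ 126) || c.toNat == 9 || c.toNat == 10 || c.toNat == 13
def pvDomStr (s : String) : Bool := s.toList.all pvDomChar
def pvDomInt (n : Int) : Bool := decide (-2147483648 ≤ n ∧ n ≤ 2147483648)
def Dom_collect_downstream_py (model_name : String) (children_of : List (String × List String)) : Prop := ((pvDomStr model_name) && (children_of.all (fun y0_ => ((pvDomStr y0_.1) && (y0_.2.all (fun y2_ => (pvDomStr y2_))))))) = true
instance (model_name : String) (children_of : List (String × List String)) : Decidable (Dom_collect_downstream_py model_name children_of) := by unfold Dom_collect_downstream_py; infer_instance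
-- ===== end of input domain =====

-- B changes the traversal: A pops one node at a time from an explicit stack and tests each child
-- against the result set; B expands a whole frontier per round with set union/difference.
-- Both return a Python set (iteration order unobservable); the ports canonicalise it by sorting,
-- so the proved equality is equality of the returned SETS.

-- shared helper: children_of.get(node, set()) — dict lookup with default
def pvChildren (children_of : List (String × List String)) (node : String) : List String :=
  (PySem.Dict.mk children_of).getD node []

-- all strings occurring as children anywhere (used only to size the fuel, provably sufficient)
def pvAll (children_of : List (String × List String)) : List String :=
  (children_of.map (fun p => p.2)).flatten

def pvFuel (children_of : List (String × List String)) : Nat :=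
  (pvAll children_of).length + 2

-- ===== PORT A =====
-- one step of A's inner 'for child in children_of.get(current, set())' loop
def pvAStep (pr : PySem.Set String × List String) (child : String) :
    PySem.Set String × List String :=
  if child ∈ pr.1 then pr else (PySem.Set.add pr.1 child, child :: pr.2)

-- A's 'while stack' loop; stack top at the head (Python appends/pops at the end).
-- The fuel only makes the recursion total; it is provably never exhausted.
def pvALoop (children_of : List (String × List String)) :
    Nat → List String → PySem.Set String → PySem.Set String
  | 0, _, result => result
  | fuel + 1, stack, result =>
    match stack with
    | [] => result
    | current :: rest =>
      let p := (pvChildren children_of current).foldl pvAStep (result, rest)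
      pvALoop children_of fuel p.2 p.1

def collect_downstream_py (model_name : String) (children_of : List (String × List String)) : List String :=
  PySem.List.sorted (pvALoop children_of (pvFuel children_of) [model_name] PySem.Set.empty)
    (fun x => x)

-- ===== PORT B =====
-- nxt = union of children_of.get(node, set()) over the frontier
def pvNext (children_of : List (String × List String)) (frontier : PySem.Set String) :
    PySem.Set String :=
  frontier.foldl (fun acc node => PySem.Set.union acc (pvChildren children_of node))
    PySem.Set.empty

-- B's 'while frontier' loop (fuel is provably never exhausted)
def pvBLoop (children_of : List (String × List String)) :
    Nat → PySem.Set String → PySem.Set String → PySem.Set String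
  | 0, result, _ => result
  | fuel + 1, result, frontier =>
    if frontier.isEmpty then result
    else
      let newf := PySem.Set.diff (pvNext children_of frontier) result
      pvBLoop children_of fuel (PySem.Set.union result newf) newf

def collect_downstream_py_alt (model_name : String) (children_of : List (String × List String)) : List String :=
  PySem.List.sorted
    (pvBLoop children_of (pvFuel children_of) PySem.Set.empty (PySem.Set.ofList [model_name]))
    (fun x => x)

-- ===== PRECONDITION & SPEC =====
def Spec_collect_downstream_py (model_name : String) (children_of : List (String × List String)) (out : List String) : Prop := out = collect_downstream_py_alt model_name children_of
instance (model_name : String) (children_of : List (String × List String)) (out : List String) : Decidable (Spec_collect_downstream_py model_name children_of out) := by unfold Spec_collect_downstream_py; infer_instance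

-- ===== CLAIM (what is proved, stated in full; the proofs are below) =====
def Claim_equal_collect_downstream_py : Prop := ∀ (model_name : String) (children_of : List (String × List String)), Dom_collect_downstream_py model_name children_of → Spec_collect_downstream_py model_name children_of (collect_downstream_py model_name children_of)

-- ===== LEMMAS AND PROOFS =====

-- downstream reachability: x is a child of m, or a child of something reachable
inductive pvReach (children_of : List (String × List String)) (m : String) : String → Prop
  | head {c : String} : c ∈ pvChildren children_of m → pvReach children_of m c
  | tail {v c : String} : pvReach children_of m v → c ∈ pvChildren children_of v →
      pvReach children_of m c

lemma pvChildren_subset (l : List (String × List String)) (node : String) :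
    ∀ c ∈ pvChildren l node, c ∈ pvAll l := by
  intro c hc
  unfold pvChildren PySem.Dict.getD PySem.Dict.get? at hc
  cases hfind : List.find? (fun p => p.1 == node) (PySem.Dict.mk l).items with
  | none => simp [hfind] at hc
  | some p =>
    simp only [hfind, Option.map_some, Option.getD_some] at hc
    have hp : p ∈ l := List.mem_of_find?_eq_some hfind
    exact List.mem_flatten.mpr ⟨p.2, List.mem_map_of_mem hp, hc⟩

lemma pvCard (l : List (String × List String)) (r : List String) (hn : r.Nodup)
    (hsub : ∀ x ∈ r, x ∈ pvAll l) : r.length ≤ (pvAll l).dedup.length :=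
  (List.subperm_of_subset hn (fun x hx => List.mem_dedup.mpr (hsub x hx))).length_le

-- the inner 'for child in …' fold of A: exact description of the new result and stack
lemma pvAFold (cs : List String) :
    ∀ (r : PySem.Set String) (st : List String), r.Nodup →
    (cs.foldl pvAStep (r, st)).1.Nodup
    ∧ (∀ x, x ∈ (cs.foldl pvAStep (r, st)).1 ↔ x ∈ r ∨ x ∈ cs)
    ∧ (∀ s ∈ (cs.foldl pvAStep (r, st)).2, s ∈ st ∨ s ∈ cs)
    ∧ (∀ s ∈ st, s ∈ (cs.foldl pvAStep (r, st)).2)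
    ∧ (∀ x ∈ cs, x ∉ r → x ∈ (cs.foldl pvAStep (r, st)).2)
    ∧ (cs.foldl pvAStep (r, st)).1.length + st.length
        = r.length + (cs.foldl pvAStep (r, st)).2.length := by
  induction cs with
  | nil => intro r st hn; simp [hn]
  | cons c cs ih =>
    intro r st hn
    by_cases hc : c ∈ r
    · have hstep : pvAStep (r, st) c = (r, st) := by simp [pvAStep, hc]
      obtain ⟨i1, i2, i3, i4, i5, i6⟩ := ih r st hn
      refine ⟨?_, ?_, ?_, ?_, ?_, ?_⟩ <;> simp only [List.foldl_cons, hstep]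
      · exact i1
      · intro x
        rw [i2]
        constructor
        · rintro (h | h)
          · exact Or.inl h
          · exact Or.inr (List.mem_cons_of_mem _ h)
        · rintro (h | h)
          · exact Or.inl h
          · rcases List.mem_cons.mp h with rfl | h
            · exact Or.inl hc
            · exact Or.inr h
      · intro s hs
        rcases i3 s hs with h | h
        · exact Or.inl h
        · exact Or.inr (List.mem_cons_of_mem _ h)
      · exact i4
      · intro x hx hxr
        rcases List.mem_cons.mp hx with rfl | hx
        · exact absurd hc hxr
        · exact i5 x hx hxr
      · exact i6
    · have hstep : pvAStep (r, st) c = (r ++ [c], c :: st) := by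
        simp only [pvAStep]
        rw [if_neg (by simpa using hc), PySem.Set.add_of_not_mem hc]
      have hn' : (r ++ [c]).Nodup := by
        rw [← PySem.Set.add_of_not_mem hc]; exact PySem.Set.nodup_add r c hn
      obtain ⟨i1, i2, i3, i4, i5, i6⟩ := ih (r ++ [c]) (c :: st) hn'
      refine ⟨?_, ?_, ?_, ?_, ?_, ?_⟩ <;> simp only [List.foldl_cons, hstep]
      · exact i1
      · intro x
        rw [i2]
        simp only [List.mem_append, List.mem_cons]
        tauto
      · intro s hs
        rcases i3 s hs with h | h
        · rcases List.mem_cons.mp h with rfl | h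
          · exact Or.inr (List.mem_cons_self ..)
          · exact Or.inl h
        · exact Or.inr (List.mem_cons_of_mem _ h)
      · intro s hs
        exact i4 s (List.mem_cons_of_mem _ hs)
      · intro x hx hxr
        rcases List.mem_cons.mp hx with rfl | hx
        · exact i4 x (List.mem_cons_self ..)
        · by_cases hxc : x = c
          · subst hxc; exact i4 x (List.mem_cons_self ..)
          · refine i5 x hx ?_
            simp [hxc, hxr]
      · have := i6
        simp only [List.length_append, List.length_cons, List.length_nil] at this ⊢
        omega

-- A's loop: the result is nodup, sound for reachability, and closed under children at exit
lemma pvALoopSpec (children_of : List (String × List String)) (m : String) :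
    ∀ (fuel : Nat) (stack : List String) (r : PySem.Set String),
    r.Nodup →
    (∀ x ∈ r, pvReach children_of m x) →
    (∀ x ∈ r, x ∈ pvAll children_of) →
    (∀ s ∈ stack, s = m ∨ s ∈ r) →
    (∀ u, (u = m ∨ u ∈ r) → u ∈ stack ∨ ∀ c ∈ pvChildren children_of u, c ∈ r) →
    stack.length + (pvAll children_of).dedup.length ≤ fuel + r.length →
    (pvALoop children_of fuel stack r).Nodup
    ∧ (∀ x ∈ pvALoop children_of fuel stack r, pvReach children_of m x)
    ∧ (∀ u, (u = m ∨ u ∈ pvALoop children_of fuel stack r) →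
        ∀ c ∈ pvChildren children_of u, c ∈ pvALoop children_of fuel stack r) := by
  intro fuel
  induction fuel with
  | zero =>
    intro stack r hn hreach hall hstack hclose hfuel
    have hlen := pvCard children_of r hn hall
    have hempty : stack = [] := by
      cases stack with
      | nil => rfl
      | cons a t => exfalso; simp only [List.length_cons] at hfuel; omega
    subst hempty
    refine ⟨hn, hreach, ?_⟩
    intro u hu c hc
    rcases hclose u hu with h | h
    · exact absurd h (List.not_mem_nil)
    · exact h c hc
  | succ fuel ih =>
    intro stack r hn hreach hall hstack hclose hfuel
    match stack with
    | [] =>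
      refine ⟨hn, hreach, ?_⟩
      intro u hu c hc
      rcases hclose u hu with h | h
      · exact absurd h (List.not_mem_nil)
      · exact h c hc
    | current :: rest =>
      have hgoal : pvALoop children_of (fuel + 1) (current :: rest) r
          = pvALoop children_of fuel
              ((pvChildren children_of current).foldl pvAStep (r, rest)).2
              ((pvChildren children_of current).foldl pvAStep (r, rest)).1 := rfl
      rw [hgoal]
      set cs := pvChildren children_of current with hcs_def
      have hcur : current = m ∨ current ∈ r := hstack current (List.mem_cons_self ..)
      have hcs_reach : ∀ c ∈ cs, pvReach children_of m c := by
        intro c hc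
        rcases hcur with rfl | hcur
        · exact pvReach.head hc
        · exact pvReach.tail (hreach current hcur) hc
      have hcs_all : ∀ c ∈ cs, c ∈ pvAll children_of := pvChildren_subset children_of current
      obtain ⟨f1, f2, f3, f4, f5, f6⟩ := pvAFold cs r rest hn
      apply ih
      · exact f1
      · intro x hx
        rcases (f2 x).mp hx with h | h
        · exact hreach x h
        · exact hcs_reach x h
      · intro x hx
        rcases (f2 x).mp hx with h | h
        · exact hall x h
        · exact hcs_all x h
      · intro s hs
        rcases f3 s hs with h | h
        · rcases hstack s (List.mem_cons_of_mem _ h) with h' | h'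
          · exact Or.inl h'
          · exact Or.inr ((f2 s).mpr (Or.inl h'))
        · exact Or.inr ((f2 s).mpr (Or.inr h))
      · intro u hu
        by_cases hur : u = m ∨ u ∈ r
        · rcases hclose u hur with h | h
          · rcases List.mem_cons.mp h with rfl | h
            · exact Or.inr (fun c hc => (f2 c).mpr (Or.inr hc))
            · exact Or.inl (f4 u h)
          · exact Or.inr (fun c hc => (f2 c).mpr (Or.inl (h c hc)))
        · rcases hu with rfl | hu
          · exact absurd (Or.inl rfl) hur
          · rcases (f2 u).mp hu with h | h
            · exact absurd (Or.inr h) hur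
            · exact Or.inl (f5 u h (fun hxr => hur (Or.inr hxr)))
      · simp only [List.length_cons] at hfuel
        omega

-- the 'nxt |= children_of.get(node, set())' fold of B
lemma pvNextFold (children_of : List (String × List String)) (fr : List String) :
    ∀ acc : PySem.Set String, acc.Nodup →
    (fr.foldl (fun acc node => PySem.Set.union acc (pvChildren children_of node)) acc).Nodup
    ∧ (∀ x, x ∈ fr.foldl (fun acc node => PySem.Set.union acc (pvChildren children_of node)) acc
        ↔ x ∈ acc ∨ ∃ u ∈ fr, x ∈ pvChildren children_of u) := by
  induction fr with
  | nil => intro acc hn; simpa using hn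
  | cons a t ih =>
    intro acc hn
    obtain ⟨i1, i2⟩ := ih (PySem.Set.union acc (pvChildren children_of a))
      (PySem.Set.nodup_union acc _ hn)
    refine ⟨i1, ?_⟩
    intro x
    simp only [List.foldl_cons]
    rw [i2, PySem.Set.mem_union]
    constructor
    · rintro ((h | h) | ⟨u, hu, hx⟩)
      · exact Or.inl h
      · exact Or.inr ⟨a, List.mem_cons_self .., h⟩
      · exact Or.inr ⟨u, List.mem_cons_of_mem _ hu, hx⟩
    · rintro (h | ⟨u, hu, hx⟩)
      · exact Or.inl (Or.inl h)
      · rcases List.mem_cons.mp hu with rfl | hu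
        · exact Or.inl (Or.inr hx)
        · exact Or.inr ⟨u, hu, hx⟩

lemma pvNextSpec (children_of : List (String × List String)) (fr : PySem.Set String) :
    (pvNext children_of fr).Nodup
    ∧ (∀ x, x ∈ pvNext children_of fr ↔ ∃ u ∈ fr, x ∈ pvChildren children_of u) := by
  obtain ⟨h1, h2⟩ := pvNextFold children_of fr PySem.Set.empty List.nodup_nil
  refine ⟨h1, fun x => ?_⟩
  rw [pvNext, h2]
  simp [PySem.Set.empty]

-- B's loop: same three exit properties as A's loop
lemma pvBLoopSpec (children_of : List (String × List String)) (m : String) :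
    ∀ (fuel : Nat) (r fr : PySem.Set String),
    r.Nodup →
    (∀ x ∈ r, pvReach children_of m x) →
    (∀ x ∈ r, x ∈ pvAll children_of) →
    (∀ x ∈ fr, x = m ∨ pvReach children_of m x) →
    (∀ u, (u = m ∨ u ∈ r) → u ∈ fr ∨ ∀ c ∈ pvChildren children_of u, c ∈ r) →
    (fr ≠ [] → (pvAll children_of).dedup.length + 1 ≤ fuel + r.length) →
    (pvBLoop children_of fuel r fr).Nodup
    ∧ (∀ x ∈ pvBLoop children_of fuel r fr, pvReach children_of m x)
    ∧ (∀ u, (u = m ∨ u ∈ pvBLoop children_of fuel r fr) →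
        ∀ c ∈ pvChildren children_of u, c ∈ pvBLoop children_of fuel r fr) := by
  intro fuel
  induction fuel with
  | zero =>
    intro r fr hn hreach hall hfr hclose hfuel
    have hlen := pvCard children_of r hn hall
    have hempty : fr = [] := by
      by_contra h
      have := hfuel h
      omega
    subst hempty
    refine ⟨hn, hreach, ?_⟩
    intro u hu c hc
    rcases hclose u hu with h | h
    · exact absurd h (List.not_mem_nil)
    · exact h c hc
  | succ fuel ih =>
    intro r fr hn hreach hall hfr hclose hfuel
    by_cases hfre : fr = []
    · subst hfre
      have hgoal : pvBLoop children_of (fuel + 1) r [] = r := rfl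
      rw [hgoal]
      refine ⟨hn, hreach, ?_⟩
      intro u hu c hc
      rcases hclose u hu with h | h
      · exact absurd h (List.not_mem_nil)
      · exact h c hc
    · have hgoal : pvBLoop children_of (fuel + 1) r fr
          = pvBLoop children_of fuel
              (PySem.Set.union r (PySem.Set.diff (pvNext children_of fr) r))
              (PySem.Set.diff (pvNext children_of fr) r) := by
        have : fr.isEmpty = false := by
          cases fr with
          | nil => exact absurd rfl hfre
          | cons a t => rfl
        simp [pvBLoop, this]
      rw [hgoal]
      obtain ⟨hn_nxt, hmem_nxt⟩ := pvNextSpec children_of fr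
      set newf := PySem.Set.diff (pvNext children_of fr) r with hnewf_def
      have hn_newf : newf.Nodup := PySem.Set.nodup_diff _ r hn_nxt
      have hmem_newf : ∀ x, x ∈ newf ↔ (∃ u ∈ fr, x ∈ pvChildren children_of u) ∧ x ∉ r := by
        intro x
        rw [hnewf_def, PySem.Set.mem_diff, hmem_nxt]
      have hnewf_reach : ∀ x ∈ newf, pvReach children_of m x := by
        intro x hx
        obtain ⟨⟨u, hu, hxu⟩, _⟩ := (hmem_newf x).mp hx
        rcases hfr u hu with rfl | h
        · exact pvReach.head hxu
        · exact pvReach.tail h hxu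
      have hmem_r' : ∀ x, x ∈ PySem.Set.union r newf ↔ x ∈ r ∨ x ∈ newf :=
        fun x => PySem.Set.mem_union r newf x
      apply ih
      · exact PySem.Set.nodup_union r newf hn
      · intro x hx
        rcases (hmem_r' x).mp hx with h | h
        · exact hreach x h
        · exact hnewf_reach x h
      · intro x hx
        rcases (hmem_r' x).mp hx with h | h
        · exact hall x h
        · obtain ⟨⟨u, _, hxu⟩, _⟩ := (hmem_newf x).mp h
          exact pvChildren_subset children_of u x hxu
      · intro x hx
        exact Or.inr (hnewf_reach x hx)
      · intro u hu
        by_cases hun : u ∈ newf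
        · exact Or.inl hun
        · have hur : u = m ∨ u ∈ r := by
            rcases hu with rfl | hu
            · exact Or.inl rfl
            · rcases (hmem_r' u).mp hu with h | h
              · exact Or.inr h
              · exact absurd h hun
          rcases hclose u hur with h | h
          · refine Or.inr (fun c hc => ?_)
            by_cases hcr : c ∈ r
            · exact (hmem_r' c).mpr (Or.inl hcr)
            · exact (hmem_r' c).mpr (Or.inr ((hmem_newf c).mpr ⟨⟨u, h, hc⟩, hcr⟩))
          · exact Or.inr (fun c hc => (hmem_r' c).mpr (Or.inl (h c hc)))
      · intro hne
        have hdisj : ∀ x ∈ newf, x ∉ r := fun x hx => ((hmem_newf x).mp hx).2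
        have happ : PySem.Set.union r newf = r ++ newf := by
          simpa [PySem.Set.union] using
            PySem.Set.update_eq_append_of_disjoint r newf hn_newf hdisj
        have hpos : 1 ≤ newf.length := by
          cases hn2 : newf with
          | nil => exact absurd hn2 hne
          | cons a t => simp
        have := hfuel hfre
        rw [happ, List.length_append]
        omega

-- top-level characterisation: membership in either result IS reachability
lemma pvA_mem (children_of : List (String × List String)) (m : String) :
    (pvALoop children_of (pvFuel children_of) [m] PySem.Set.empty).Nodup
    ∧ (∀ x, x ∈ pvALoop children_of (pvFuel children_of) [m] PySem.Set.empty
        ↔ pvReach children_of m x) := by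
  have hdedup : (pvAll children_of).dedup.length ≤ (pvAll children_of).length :=
    (List.dedup_sublist _).length_le
  obtain ⟨h1, h2, h3⟩ := pvALoopSpec children_of m (pvFuel children_of) [m] PySem.Set.empty
    List.nodup_nil (by intro x hx; simp [PySem.Set.empty] at hx)
    (by intro x hx; simp [PySem.Set.empty] at hx)
    (by intro s hs; exact Or.inl (List.mem_singleton.mp hs))
    (by
      intro u hu
      rcases hu with rfl | hu
      · exact Or.inl (List.mem_singleton.mpr rfl)
      · simp [PySem.Set.empty] at hu)
    (by simp only [List.length_singleton, PySem.Set.empty, List.length_nil, pvFuel]; omega)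
  refine ⟨h1, fun x => ⟨h2 x, fun hx => ?_⟩⟩
  induction hx with
  | head hc => exact h3 m (Or.inl rfl) _ hc
  | tail _ hc ihv => exact h3 _ (Or.inr ihv) _ hc

lemma pvB_mem (children_of : List (String × List String)) (m : String) :
    (pvBLoop children_of (pvFuel children_of) PySem.Set.empty (PySem.Set.ofList [m])).Nodup
    ∧ (∀ x, x ∈ pvBLoop children_of (pvFuel children_of) PySem.Set.empty (PySem.Set.ofList [m])
        ↔ pvReach children_of m x) := by
  have hdedup : (pvAll children_of).dedup.length ≤ (pvAll children_of).length :=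
    (List.dedup_sublist _).length_le
  have hof : PySem.Set.ofList [m] = [m] := rfl
  obtain ⟨h1, h2, h3⟩ := pvBLoopSpec children_of m (pvFuel children_of) PySem.Set.empty
    (PySem.Set.ofList [m])
    List.nodup_nil (by intro x hx; simp [PySem.Set.empty] at hx)
    (by intro x hx; simp [PySem.Set.empty] at hx)
    (by intro x hx; rw [hof] at hx; exact Or.inl (List.mem_singleton.mp hx))
    (by
      intro u hu
      rcases hu with rfl | hu
      · exact Or.inl (by rw [hof]; exact List.mem_singleton.mpr rfl)
      · simp [PySem.Set.empty] at hu)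
    (by intro _; simp only [PySem.Set.empty, List.length_nil, pvFuel]; omega)
  refine ⟨h1, fun x => ⟨h2 x, fun hx => ?_⟩⟩
  induction hx with
  | head hc => exact h3 m (Or.inl rfl) _ hc
  | tail _ hc ihv => exact h3 _ (Or.inr ihv) _ hc

-- ===== VERDICT (by name: the statement is the Claim_ definition above) =====
theorem collect_downstream_py_spec : Claim_equal_collect_downstream_py := by
  intro model_name children_of _
  unfold Spec_collect_downstream_py collect_downstream_py collect_downstream_py_alt
  obtain ⟨hAn, hAm⟩ := pvA_mem children_of model_name
  obtain ⟨hBn, hBm⟩ := pvB_mem children_of model_name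
  exact PySem.List.sorted_eq_sorted_of_perm _ _ _ Function.injective_id
    ((List.perm_ext_iff_of_nodup hAn hBn).mpr (fun x => (hAm x).trans (hBm x).symm))
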